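-- pv_equiv track=rewrite | github.com/LegitStack/maestro | maestro/core/transition.py | indirect_path
-- ===== SOURCE A (Python) =====
-- import itertools
--
-- def indirect_path(start, finish):
--     n = len(start)
--     lst = [list(i) for i in itertools.product([0, 1], repeat=n)]
--     indices = []
--     mute = start
--     for i, rep in enumerate(lst):
--         if i > 0:
--             keep_count = 0
--             temp = mute
--             for ix, item in enumerate(rep):
--                 if item == 0 :
--                     temp[ix] = temp[ix]
--                     keep_count += 1
--                 elif item == 1 and start[ix] != finish[ix]:
--                     temp[ix] = not temp[ix]
--                     keep_count += 1
--             if keep_count == len(rep):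
--                 indices.append(i)
--                 mute = temp
--                 if mute == finish:
--                     break
--     return indices
-- ===== SOURCE B (Python) =====
-- def indirect_path(start, finish):
--     # Closed form: A's in-place flipping (start, mute and temp alias one list) appends
--     # exactly the powers 2**(n-1-ix), in increasing order, for each position where
--     # start differs from finish.  (Return value only: A also mutates start in place.)
--     n = len(start)
--     return [2 ** k for k in range(n) if start[n - 1 - k] != finish[n - 1 - k]]
-- ===== Notes on version B (the rewrite author's own statement) =====
-- stated objective: faster
-- what changed: Replaces the exponential scan over all 2^n bit-vectors (with in-place aliased flipping of start) by the closed form: one power of two per differing position, listed in increasing order.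
import Mathlib
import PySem

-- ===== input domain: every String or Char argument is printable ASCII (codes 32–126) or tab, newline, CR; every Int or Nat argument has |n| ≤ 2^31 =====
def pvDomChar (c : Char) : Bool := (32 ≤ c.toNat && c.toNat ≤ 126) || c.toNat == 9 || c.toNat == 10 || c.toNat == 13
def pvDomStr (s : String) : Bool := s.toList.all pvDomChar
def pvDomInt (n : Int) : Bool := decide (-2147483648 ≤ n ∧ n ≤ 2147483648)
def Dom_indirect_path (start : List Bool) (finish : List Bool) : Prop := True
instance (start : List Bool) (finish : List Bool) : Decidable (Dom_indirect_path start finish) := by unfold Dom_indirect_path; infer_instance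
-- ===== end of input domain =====

-- B replaces A's exponential scan over all 2^n bit-vectors by the closed form (one power of
-- two per differing position, increasing); return value only: A also mutates `start` in place.

-- ===== PORT A =====
-- lst = [list(i) for i in itertools.product([0, 1], repeat=n)]  (first coordinate varies slowest)
def pvProd01 : Nat → List (List Int)
  | 0 => [[]]
  | n + 1 => ((pvProd01 n).map (fun r => (0 : Int) :: r)) ++ ((pvProd01 n).map (fun r => (1 : Int) :: r))

-- the inner 'for ix, item in enumerate(rep)' loop.  In Python `start`, `mute` and `temp` are
-- the SAME list object, so 'start[ix] != finish[ix]' reads the current temp, and the in-place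
-- flips persist even when keep_count < len(rep).  ix is always in range for temp (0 ≤ ix < n),
-- so getD/toNat are exact; finish[ix] is exact under Pre_ (Python raises IndexError otherwise).
def pvInnerA (finish : List Bool) : List (Int × Int) → List Bool → Int → List Bool × Int
  | [], temp, keep => (temp, keep)
  | (ix, item) :: rest, temp, keep =>
    if item = 0 then
      pvInnerA finish rest temp (keep + 1)          -- temp[ix] = temp[ix] is a no-op
    else if item = 1 ∧ temp.getD ix.toNat false ≠ finish.getD ix.toNat false then
      pvInnerA finish rest (temp.set ix.toNat (!temp.getD ix.toNat false)) (keep + 1)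
    else
      pvInnerA finish rest temp keep

-- the outer 'for i, rep in enumerate(lst)' loop with its break
def pvOuterA (finish : List Bool) : List (Int × List Int) → List Bool → List Int → List Int
  | [], _, indices => indices
  | (i, rep) :: rest, mute, indices =>
    if 0 < i then
      let r := pvInnerA finish (PySem.List.enumerate rep) mute 0
      if r.2 = (rep.length : Int) then
        if r.1 = finish then indices ++ [i]          -- break
        else pvOuterA finish rest r.1 (indices ++ [i])
      else pvOuterA finish rest r.1 indices          -- mutations persist (aliasing)
    else pvOuterA finish rest mute indices

def indirect_path (start : List Bool) (finish : List Bool) : List Int :=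
  pvOuterA finish (PySem.List.enumerate (pvProd01 start.length)) start []

-- ===== PORT B =====
-- [2 ** k for k in range(n) if start[n-1-k] != finish[n-1-k]]; indices are in range under Pre_
def indirect_path_alt (start : List Bool) (finish : List Bool) : List Int :=
  let n := start.length
  ((PySem.List.pyRange 0 n 1).filter
      (fun k => PySem.List.pyGetD start ((n : Int) - 1 - k) false
             != PySem.List.pyGetD finish ((n : Int) - 1 - k) false)).map
    (fun k => (2 : Int) ^ k.toNat)

-- ===== PRECONDITION & SPEC =====
-- Pre_ excludes exactly the inputs where Python A raises IndexError (finish shorter than start);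
-- B raises there as well.
def Pre_indirect_path (start : List Bool) (finish : List Bool) : Prop :=
  start.length ≤ finish.length
instance (start : List Bool) (finish : List Bool) : Decidable (Pre_indirect_path start finish) := by
  unfold Pre_indirect_path; infer_instance

def pvWitness_indirect_path : List Bool × List Bool := ([true, false], [false, false])

def Spec_indirect_path (start : List Bool) (finish : List Bool) (out : List Int) : Prop :=
  out = indirect_path_alt start finish
instance (start : List Bool) (finish : List Bool) (out : List Int) : Decidable (Spec_indirect_path start finish out) := by
  unfold Spec_indirect_path; infer_instance

-- ===== CLAIM (what is proved, stated in full; the proofs are below) =====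
def Claim_equal_indirect_path : Prop :=
  ∀ (start : List Bool) (finish : List Bool), Dom_indirect_path start finish →
    Pre_indirect_path start finish →
    Spec_indirect_path start finish (indirect_path start finish)

-- ===== LEMMAS AND PROOFS =====

-- proof-side mirror of the outer loop: returns (appended indices, final state, broke?);
-- `brk` switches the break off (used to analyse the half of the scan where it cannot fire)
def pvRunP (brk : Bool) (fin : List Bool) : List (Int × List Int) → List Bool → List Int × List Bool × Bool
  | [], mute => ([], mute, false)
  | (i, rep) :: rest, mute =>
    if 0 < i then
      let r := pvInnerA fin (PySem.List.enumerate rep) mute 0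
      if r.2 = (rep.length : Int) then
        if brk ∧ r.1 = fin then ([i], r.1, true)
        else
          let q := pvRunP brk fin rest r.1
          (i :: q.1, q.2.1, q.2.2)
      else pvRunP brk fin rest r.1
    else pvRunP brk fin rest mute

-- the closed form both sides are reduced to
def pvTarget (n : Nat) (s f : List Bool) : List Int :=
  (List.range n).filterMap
    (fun k => if s.getD (n - 1 - k) false ≠ f.getD (n - 1 - k) false then some ((2 : Int) ^ k) else none)

theorem pvRel (fin : List Bool) (L : List (Int × List Int)) : ∀ (mute : List Bool) (idx : List Int),
    pvOuterA fin L mute idx = idx ++ (pvRunP true fin L mute).1 := by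
  induction L with
  | nil => intro mute idx; simp [pvOuterA, pvRunP]
  | cons p rest ih =>
    intro mute idx
    obtain ⟨i, rep⟩ := p
    simp only [pvOuterA, pvRunP]
    by_cases hi : 0 < i
    · simp only [if_pos hi]
      by_cases hk : (pvInnerA fin (PySem.List.enumerate rep) mute 0).2 = (rep.length : Int)
      · simp only [if_pos hk]
        by_cases hb : (pvInnerA fin (PySem.List.enumerate rep) mute 0).1 = fin
        · simp [hb]
        · simp [hb, ih]
      · simp [hk, ih]
    · simp [hi, ih]

theorem pvKeep (fin : List Bool) (E : List (Int × Int)) : ∀ (temp : List Bool) (k : Int),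
    pvInnerA fin E temp k = ((pvInnerA fin E temp 0).1, k + (pvInnerA fin E temp 0).2) := by
  induction E with
  | nil => intro temp k; simp [pvInnerA]
  | cons p rest ih =>
    intro temp k
    obtain ⟨ix, item⟩ := p
    by_cases h0 : item = 0
    · simp only [pvInnerA, if_pos h0]
      rw [ih temp (k + 1), ih temp (0 + 1)]
      exact Prod.ext rfl (by ring)
    · by_cases hc : item = 1 ∧ temp.getD ix.toNat false ≠ fin.getD ix.toNat false
      · simp only [pvInnerA, if_neg h0, if_pos hc]
        rw [ih _ (k + 1), ih _ (0 + 1)]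
        exact Prod.ext rfl (by ring)
      · simp only [pvInnerA, if_neg h0, if_neg hc]
        exact ih temp k

theorem pvShift (fin : List Bool) (f : Bool) (rep : List Int) :
    ∀ (j : Int) (b : Bool) (t : List Bool) (k : Int), 0 ≤ j →
    pvInnerA (f :: fin) (PySem.List.enumerate rep (j + 1)) (b :: t) k
      = ((b :: (pvInnerA fin (PySem.List.enumerate rep j) t k).1),
         (pvInnerA fin (PySem.List.enumerate rep j) t k).2) := by
  induction rep with
  | nil => intro j b t k hj; simp [pvInnerA, PySem.List.enumerate_nil]
  | cons x xs ih =>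
    intro j b t k hj
    rw [PySem.List.enumerate_cons, PySem.List.enumerate_cons]
    have hidx : (j + 1).toNat = j.toNat + 1 := by omega
    by_cases h0 : x = 0
    · simp only [pvInnerA, if_pos h0]
      exact ih (j + 1) b t (k + 1) (by omega)
    · have hg : (b :: t).getD (j + 1).toNat false = t.getD j.toNat false := by
        rw [hidx, List.getD_cons_succ]
      have hf : (f :: fin).getD (j + 1).toNat false = fin.getD j.toNat false := by
        rw [hidx, List.getD_cons_succ]
      by_cases hc : x = 1 ∧ t.getD j.toNat false ≠ fin.getD j.toNat false
      · have hc2 : x = 1 ∧ (b :: t).getD (j + 1).toNat false ≠ (f :: fin).getD (j + 1).toNat false := by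
          rw [hg, hf]; exact hc
        have hs : (b :: t).set (j + 1).toNat (!(b :: t).getD (j + 1).toNat false)
            = b :: t.set j.toNat (!t.getD j.toNat false) := by
          rw [hidx]; simp [List.getD_cons_succ, List.set_cons_succ]
        simp only [pvInnerA, if_neg h0, if_pos hc2, if_pos hc, hs]
        exact ih (j + 1) b _ (k + 1) (by omega)
      · have hc2 : ¬(x = 1 ∧ (b :: t).getD (j + 1).toNat false ≠ (f :: fin).getD (j + 1).toNat false) := by
          rw [hg, hf]; exact hc
        simp only [pvInnerA, if_neg h0, if_neg hc2, if_neg hc]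
        exact ih (j + 1) b t k (by omega)

theorem pvZeros (fin : List Bool) (m : Nat) :
    ∀ (j : Int) (temp : List Bool) (k : Int),
    pvInnerA fin (PySem.List.enumerate (List.replicate m (0 : Int)) j) temp k = (temp, k + m) := by
  induction m with
  | zero => intro j temp k; simp [pvInnerA, PySem.List.enumerate_nil]
  | succ m ih =>
    intro j temp k
    rw [List.replicate_succ, PySem.List.enumerate_cons]
    simp only [pvInnerA, if_pos rfl]
    rw [ih]
    exact Prod.ext rfl (by push_cast; ring)

theorem pvAgree (fin : List Bool) (rep : List Int) :
    ∀ (j : Nat) (temp : List Bool) (k : Int),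
    (∀ x ∈ rep, x = 0 ∨ x = 1) →
    (∀ pos, pos < rep.length → temp.getD (j + pos) false = fin.getD (j + pos) false) →
    pvInnerA fin (PySem.List.enumerate rep (j : Int)) temp k
      = (temp, k + (rep.countP (fun x => x = 0) : Int)) := by
  induction rep with
  | nil => intros; simp [pvInnerA, PySem.List.enumerate_nil]
  | cons x xs ih =>
    intro j temp k h01 hag
    rw [PySem.List.enumerate_cons,
        show (j : Int) + 1 = ((j + 1 : Nat) : Int) by push_cast; ring]
    have hagT : ∀ pos, pos < xs.length →
        temp.getD (j + 1 + pos) false = fin.getD (j + 1 + pos) false := by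
      intro pos hpos
      have := hag (pos + 1) (by simpa using Nat.succ_lt_succ hpos)
      rwa [show j + (pos + 1) = j + 1 + pos by omega] at this
    rcases h01 x (List.mem_cons_self) with rfl | rfl
    · simp only [pvInnerA, if_pos rfl]
      rw [ih (j + 1) temp (k + 1) (fun y hy => h01 y (List.mem_cons_of_mem _ hy)) hagT]
      refine Prod.ext rfl ?_
      simp [List.countP_cons]
      push_cast; ring
    · have heq : temp.getD j false = fin.getD j false := by simpa using hag 0 (by simp)
      have hc : ¬(True ∧ temp.getD ((j : Int)).toNat false ≠ fin.getD ((j : Int)).toNat false) := by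
        intro hcon
        exact hcon.2 (by rw [Int.toNat_natCast]; exact heq)
      simp only [pvInnerA]
      rw [if_neg hc,
          ih (j + 1) temp k (fun y hy => h01 y (List.mem_cons_of_mem _ hy)) hagT]
      refine Prod.ext rfl ?_
      simp [List.countP_cons]

theorem pvNoMore (brk : Bool) (fin : List Bool) (L : List (Int × List Int)) (st : List Bool)
    (hL : ∀ p ∈ L, 0 < p.1 ∧ ∃ r, p.2 = (1 : Int) :: r ∧ (∀ x ∈ r, x = 0 ∨ x = 1) ∧ r.length + 1 ≤ st.length)
    (hag : ∀ pos, pos < st.length → st.getD pos false = fin.getD pos false) :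
    pvRunP brk fin L st = ([], st, false) := by
  induction L with
  | nil => simp [pvRunP]
  | cons p rest ih =>
    obtain ⟨i, rep⟩ := p
    obtain ⟨hi, r, hrep, h01, hlen⟩ := hL _ List.mem_cons_self
    subst hrep
    have h01' : ∀ x ∈ (1 : Int) :: r, x = 0 ∨ x = 1 := by
      intro x hx
      rcases List.mem_cons.1 hx with rfl | hx'
      · right; rfl
      · exact h01 x hx'
    have hin := pvAgree fin ((1 : Int) :: r) 0 st 0 h01'
      (by intro pos hpos; simpa using hag pos (by simp at hpos; omega))
    rw [show ((0 : Nat) : Int) = 0 from rfl] at hin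
    have hcnt : List.countP (fun x => decide (x = 0)) ((1 : Int) :: r) ≤ r.length := by
      rw [List.countP_cons]
      simpa using List.countP_le_length (l := r) (p := fun x => decide (x = 0))
    have hguard : ¬((pvInnerA fin (PySem.List.enumerate ((1 : Int) :: r)) st 0).2
        = (((1 : Int) :: r).length : Int)) := by
      rw [hin]; simp only [List.length_cons]; push_cast; omega
    simp only [pvRunP, if_pos hi, if_neg hguard]
    rw [show (pvInnerA fin (PySem.List.enumerate ((1 : Int) :: r)) st 0).1 = st by rw [hin]]
    exact ih (fun p hp => hL p (List.mem_cons_of_mem _ hp))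

theorem pvEntries (n : Nat) : ∀ r ∈ pvProd01 n, (∀ x ∈ r, x = 0 ∨ x = 1) ∧ r.length = n := by
  induction n with
  | zero => intro r hr; simp [pvProd01] at hr; simp [hr]
  | succ n ih =>
    intro r hr
    simp only [pvProd01, List.mem_append, List.mem_map] at hr
    rcases hr with ⟨s, hs, rfl⟩ | ⟨s, hs, rfl⟩ <;>
      obtain ⟨h1, h2⟩ := ih s hs <;>
      refine ⟨?_, by simp [h2]⟩ <;> intro x hx <;> rcases List.mem_cons.1 hx with rfl | hx'
    · left; rfl
    · exact h1 x hx'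
    · right; rfl
    · exact h1 x hx' 

theorem pvLen (n : Nat) : (pvProd01 n).length = 2 ^ n := by
  induction n with
  | zero => rfl
  | succ n ih => simp [pvProd01, ih, pow_succ]; ring

theorem pvHeadTail (n : Nat) : ∃ Q, pvProd01 n = List.replicate n (0 : Int) :: Q := by
  induction n with
  | zero => exact ⟨[], rfl⟩
  | succ n ih =>
    obtain ⟨Q, hQ⟩ := ih
    refine ⟨Q.map (fun r => (0 : Int) :: r) ++ (pvProd01 n).map (fun r => (1 : Int) :: r), ?_⟩
    rw [show pvProd01 (n + 1)
        = ((pvProd01 n).map (fun r => (0 : Int) :: r)) ++ ((pvProd01 n).map (fun r => (1 : Int) :: r))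
        from rfl, hQ, List.map_cons, List.replicate_succ, List.cons_append]

theorem pvEnumMap {α β : Type} (g : α → β) (P : List α) : ∀ (j : Int),
    PySem.List.enumerate (P.map g) j = (PySem.List.enumerate P j).map (fun p => (p.1, g p.2)) := by
  induction P with
  | nil => intro j; simp [PySem.List.enumerate_nil]
  | cons x xs ih => intro j; rw [List.map_cons, PySem.List.enumerate_cons, PySem.List.enumerate_cons,
      List.map_cons, ih]

theorem pvRunApp (brk : Bool) (fin : List Bool) (L1 L2 : List (Int × List Int)) : ∀ (m : List Bool),
    pvRunP brk fin (L1 ++ L2) m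
      = (let q := pvRunP brk fin L1 m;
         if q.2.2 then q
         else let q2 := pvRunP brk fin L2 q.2.1; (q.1 ++ q2.1, q2.2.1, q2.2.2)) := by
  induction L1 with
  | nil => intro m; simp [pvRunP]
  | cons p rest ih =>
    intro m
    obtain ⟨i, rep⟩ := p
    simp only [List.cons_append, pvRunP]
    by_cases hi : 0 < i
    · simp only [if_pos hi]
      by_cases hk : (pvInnerA fin (PySem.List.enumerate rep) m 0).2 = (rep.length : Int)
      · simp only [if_pos hk]
        by_cases hb : brk = true ∧ (pvInnerA fin (PySem.List.enumerate rep) m 0).1 = fin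
        · simp [hb]
        · simp only [if_neg hb, ih]
          by_cases hq : (pvRunP brk fin rest (pvInnerA fin (PySem.List.enumerate rep) m 0).1).2.2
          · simp [hq]
          · simp [hq]
      · simp only [if_neg hk]
        exact ih _
    · simp only [if_neg hi]
      exact ih _

theorem pvLift0 (brk : Bool) (f : Bool) (fs : List Bool) (L : List (Int × List Int)) :
    ∀ (b : Bool) (t : List Bool),
    pvRunP brk (f :: fs) (L.map (fun p => (p.1, (0 : Int) :: p.2))) (b :: t)
      = (let q := pvRunP (brk && (b == f)) fs L t; (q.1, b :: q.2.1, q.2.2)) := by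
  induction L with
  | nil => intro b t; simp [pvRunP]
  | cons p rest ih =>
    intro b t
    obtain ⟨i, rep⟩ := p
    simp only [List.map_cons, pvRunP]
    by_cases hi : 0 < i
    · simp only [if_pos hi]
      have hinner : pvInnerA (f :: fs) (PySem.List.enumerate ((0 : Int) :: rep)) (b :: t) 0
          = (b :: (pvInnerA fs (PySem.List.enumerate rep) t 0).1,
             1 + (pvInnerA fs (PySem.List.enumerate rep) t 0).2) := by
        rw [PySem.List.enumerate_cons]
        simp only [pvInnerA]
        rw [pvShift fs f rep 0 b t (0 + 1) le_rfl,
            pvKeep fs (PySem.List.enumerate rep 0) t (0 + 1)]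
        norm_num
      rw [hinner]
      set R := pvInnerA fs (PySem.List.enumerate rep) t 0 with hR
      have hgiff : (1 + R.2 = ((((0 : Int) :: rep).length : Nat) : Int)) ↔ R.2 = (rep.length : Int) := by
        simp only [List.length_cons]
        push_cast
        omega
      by_cases hk : R.2 = (rep.length : Int)
      · rw [if_pos (hgiff.mpr hk), if_pos hk]
        by_cases hbr : brk = true ∧ b = f ∧ R.1 = fs
        · rw [if_pos (show brk = true ∧ b :: R.1 = f :: fs from
              ⟨hbr.1, by rw [hbr.2.1, hbr.2.2]⟩),
            if_pos (show (brk && (b == f)) = true ∧ R.1 = fs from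
              ⟨by simp [hbr.1, hbr.2.1], hbr.2.2⟩)]
        · have hL2 : ¬(brk = true ∧ b :: R.1 = f :: fs) := by
            intro h
            obtain ⟨h1, h2⟩ := h
            injection h2 with h2a h2b
            exact hbr ⟨h1, h2a, h2b⟩
          have hR2 : ¬((brk && (b == f)) = true ∧ R.1 = fs) := by
            intro h
            obtain ⟨h1, h2⟩ := h
            simp only [Bool.and_eq_true, beq_iff_eq] at h1
            exact hbr ⟨h1.1, h1.2, h2⟩
          rw [if_neg hL2, if_neg hR2, ih b R.1]
      · rw [if_neg (fun h => hk (hgiff.mp h)), if_neg hk]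
        exact ih b R.1
    · simp only [if_neg hi]
      exact ih b t

theorem pvTargetSucc (n : Nat) (b f : Bool) (t fs : List Bool) :
    pvTarget (n + 1) (b :: t) (f :: fs)
      = pvTarget n t fs ++ (if b ≠ f then [(2 : Int) ^ n] else []) := by
  unfold pvTarget
  rw [List.range_succ, List.filterMap_append]
  congr 1
  · apply List.filterMap_congr
    intro k hk
    have hk' : k < n := List.mem_range.mp hk
    rw [show n + 1 - 1 - k = (n - 1 - k) + 1 by omega, List.getD_cons_succ, List.getD_cons_succ]
  · have h0 : n + 1 - 1 - n = 0 := by omega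
    by_cases hbf : b = f <;> simp [List.filterMap, h0, hbf]

theorem pvSecond (brk : Bool) (f b : Bool) (fs' : List Bool) (n : Nat) (m : Int)
    (hm : 0 < m) (hn : n ≤ fs'.length) :
    pvRunP brk (f :: fs')
        (PySem.List.enumerate ((pvProd01 n).map (fun r => (1 : Int) :: r)) m) (b :: fs'.take n)
      = ((if b = f then ([] : List Int) else [m]), f :: fs'.take n,
         brk && !(b == f) && decide (fs'.length = n)) := by
  obtain ⟨Q, hQ⟩ := pvHeadTail n
  have hQmem : ∀ r ∈ Q, r ∈ pvProd01 n := by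
    intro r hr; rw [hQ]; exact List.mem_cons_of_mem _ hr
  have hu : (fs'.take n).length = n := by simp [List.length_take]; omega
  have htail : ∀ (g : List Int → List Int), ∀ p ∈ PySem.List.enumerate (Q.map g) (m + 1),
      0 < p.1 ∧ ∃ r', p.2 = g r' ∧ r' ∈ Q := by
    intro g p hp
    rw [PySem.List.mem_enumerate_iff] at hp
    obtain ⟨k, hk, rfl⟩ := hp
    refine ⟨show (0 : Int) < m + 1 + (k : Int) by omega, ?_⟩
    obtain ⟨r', hr', hgr⟩ := List.mem_map.1 (List.getElem_mem (l := Q.map g) (n := k) hk)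
    exact ⟨r', by rw [← hgr], hr'⟩
  have hNM : ∀ (st : List Bool), st.length = n + 1 →
      (∀ pos, pos < n + 1 → st.getD pos false = (f :: fs').getD pos false) →
      pvRunP brk (f :: fs') (PySem.List.enumerate (Q.map (fun r => (1 : Int) :: r)) (m + 1)) st
        = ([], st, false) := by
    intro st hst hag
    apply pvNoMore
    · intro p hp
      obtain ⟨hp1, r', hp2, hr'⟩ := htail _ p hp
      obtain ⟨h01, hlen⟩ := pvEntries n r' (hQmem r' hr')
      exact ⟨hp1, r', hp2, h01, by omega⟩
    · intro pos hpos; exact hag pos (by omega)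
  have hagu : ∀ pos, pos < n + 1 → (b :: fs'.take n).getD pos false = (f :: fs').getD pos false ∨ pos = 0 := by
    intro pos hpos
    cases pos with
    | zero => right; rfl
    | succ q =>
      left
      rw [List.getD_cons_succ, List.getD_cons_succ]
      have hq : q < n := by omega
      simp [List.getD, List.getElem?_take_of_lt hq]
  rw [hQ, List.map_cons, PySem.List.enumerate_cons]
  simp only [pvRunP, if_pos hm]
  have hinner0 : ∀ (c : Bool) (k : Int),
      pvInnerA (f :: fs') (PySem.List.enumerate (List.replicate n (0 : Int)) (0 + 1))
        (c :: fs'.take n) k = (c :: fs'.take n, k + (n : Int)) := by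
    intro c k
    rw [pvShift fs' f _ 0 c _ k le_rfl, pvZeros]
  by_cases hbf : b = f
  · -- head bit does not differ: nothing flips, keep_count misses position 0
    have hcond : ¬(True ∧ (b :: fs'.take n).getD ((0 : Int)).toNat false
        ≠ (f :: fs').getD ((0 : Int)).toNat false) := by
      intro h; exact h.2 (by simp [hbf])
    rw [PySem.List.enumerate_cons]
    simp only [pvInnerA]
    rw [if_neg (show ¬(1 : Int) = 0 by norm_num), if_neg hcond, hinner0]
    have hguard : ¬((0 : Int) + n = (((1 : Int) :: List.replicate n 0).length : Nat)) := by
      simp only [List.length_cons, List.length_replicate]; push_cast; omega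
    have hagB : ∀ pos, pos < n + 1 → (b :: fs'.take n).getD pos false = (f :: fs').getD pos false := by
      intro pos hpos
      rcases hagu pos hpos with h | h
      · exact h
      · subst h; simp [hbf]
    rw [if_neg hguard, hNM (b :: fs'.take n) (by simp [hu]) hagB]
    simp [hbf]
  · -- head bit differs: it flips to f, index m is appended
    have hcond : (True ∧ (b :: fs'.take n).getD ((0 : Int)).toNat false
        ≠ (f :: fs').getD ((0 : Int)).toNat false) := by
      refine ⟨trivial, ?_⟩
      simpa using hbf
    rw [PySem.List.enumerate_cons]
    simp only [pvInnerA]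
    rw [if_neg (show ¬(1 : Int) = 0 by norm_num), if_pos hcond]
    have hset : ((b :: fs'.take n).set ((0 : Int)).toNat (!(b :: fs'.take n).getD ((0 : Int)).toNat false))
        = (!b) :: fs'.take n := by simp
    rw [hset, hinner0 (!b)]
    have hnb : (!b) = f := by cases b <;> cases f <;> simp_all
    have hguard : ((0 : Int) + 1 + n = (((1 : Int) :: List.replicate n 0).length : Nat)) := by
      simp only [List.length_cons, List.length_replicate]; push_cast; omega
    rw [if_pos hguard]
    have hufs : (fs'.take n = fs') ↔ fs'.length = n := by
      constructor
      · intro h; have := congrArg List.length h; simp [hu] at this; omega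
      · intro h; exact List.take_of_length_le (by omega)
    by_cases hbl : brk = true ∧ fs'.length = n
    · rw [if_pos (show brk = true ∧ (!b) :: fs'.take n = f :: fs' from
        ⟨hbl.1, by rw [hnb, hufs.mpr hbl.2]⟩)]
      simp [hbf, hnb, hufs.mpr hbl.2, hbl.1, hbl.2]
    · rw [if_neg (show ¬(brk = true ∧ (!b) :: fs'.take n = f :: fs') from by
        intro h
        injection h.2 with h2a h2b
        exact hbl ⟨h.1, hufs.mp h2b⟩)]
      have hagNB : ∀ pos, pos < n + 1 → ((!b) :: fs'.take n).getD pos false = (f :: fs').getD pos false := by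
        intro pos hpos
        cases pos with
        | zero => simp [hnb]
        | succ q =>
          rcases hagu (q + 1) hpos with h | h
          · simpa [List.getD_cons_succ] using h
          · exact absurd h (by omega)
      rw [hNM ((!b) :: fs'.take n) (by simp [hu]) hagNB]
      have hfl : (brk && !(b == f) && decide (fs'.length = n)) = false := by
        cases hbrk : brk
        · simp
        · simp [hbf]
          exact fun h => hbl ⟨hbrk, h⟩
      rw [hfl]
      simp [hbf, hnb]

theorem pvMain (n : Nat) : ∀ (brk : Bool) (t fs : List Bool),
    t.length = n → n ≤ fs.length →
    pvRunP brk fs (PySem.List.enumerate (pvProd01 n)) t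
      = (pvTarget n t fs, fs.take n, brk && decide (t ≠ fs.take n) && decide (fs.length = n)) := by
  induction n with
  | zero =>
    intro brk t fs ht hf
    rw [List.length_eq_zero_iff] at ht
    subst ht
    simp [pvProd01, PySem.List.enumerate_cons, PySem.List.enumerate_nil, pvRunP, pvTarget]
  | succ n ih =>
    intro brk t fs ht hf
    obtain ⟨b, t', rfl⟩ : ∃ b t', t = b :: t' := by
      cases t with
      | nil => simp at ht
      | cons x xs => exact ⟨x, xs, rfl⟩
    obtain ⟨f, fs', rfl⟩ : ∃ f fs', fs = f :: fs' := by
      cases fs with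
      | nil => simp at hf
      | cons x xs => exact ⟨x, xs, rfl⟩
    have ht' : t'.length = n := by simpa using ht
    have hf' : n ≤ fs'.length := by simpa using hf
    rw [show pvProd01 (n + 1)
        = ((pvProd01 n).map (fun r => (0 : Int) :: r)) ++ ((pvProd01 n).map (fun r => (1 : Int) :: r))
        from rfl]
    rw [PySem.List.enumerate_append, pvRunApp]
    rw [show PySem.List.enumerate ((pvProd01 n).map (fun r => (0 : Int) :: r)) 0
        = (PySem.List.enumerate (pvProd01 n) 0).map (fun p => (p.1, (0 : Int) :: p.2))
        from pvEnumMap _ _ 0]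
    rw [pvLift0 brk f fs' (PySem.List.enumerate (pvProd01 n) 0) b t',
        ih (brk && (b == f)) t' fs' ht' hf']
    have hlen : ((0 : Int) + (((pvProd01 n).map (fun r => (0 : Int) :: r)).length : Nat))
        = ((2 ^ n : Nat) : Int) := by
      simp [pvLen]
    rw [hlen]
    dsimp only
    by_cases hfl : ((brk && (b == f)) && decide (t' ≠ fs'.take n) && decide (fs'.length = n)) = true
    · rw [if_pos hfl]
      have h4 := hfl
      simp only [Bool.and_eq_true, beq_iff_eq, decide_eq_true_eq] at h4
      obtain ⟨⟨⟨hbrk, hbf⟩, hne⟩, hlen2⟩ := h4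
      subst hbf
      rw [pvTargetSucc]
      simp [hbrk, hne, hlen2, List.take_succ_cons]
    · rw [if_neg hfl]
      rw [pvSecond brk f b fs' n ((2 ^ n : Nat) : Int) (by positivity) hf']
      have hfl' : ((brk && (b == f)) && decide (t' ≠ fs'.take n) && decide (fs'.length = n)) = false :=
        Bool.eq_false_iff.mpr hfl
      rw [pvTargetSucc]
      by_cases hbf : b = f
      · subst hbf
        simp only [beq_self_eq_true, Bool.and_true] at hfl'
        simp [List.take_succ_cons]
        intro h1 h2 h3
        rw [h1] at hfl'
        simp [h2, h3] at hfl' 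
      · simp [List.take_succ_cons, hbf]
        push_cast
        cases brk <;> simp [show (b == f) = false from by simp [hbf]]

theorem pvFilterMapOfFilter {α β : Type} (l : List α) (p : α → Bool) (g : α → β) :
    (l.filter p).map g = l.filterMap (fun a => if p a then some (g a) else none) := by
  induction l with
  | nil => rfl
  | cons x xs ih =>
    by_cases hx : p x <;> simp [List.filter_cons, List.filterMap_cons, hx, ih]

theorem pvAlt (start finish : List Bool) (h : start.length ≤ finish.length) :
    indirect_path_alt start finish = pvTarget start.length start finish := by
  unfold indirect_path_alt pvTarget
  dsimp only
  rw [PySem.List.pyRange_one]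
  simp only [Int.sub_zero, Int.toNat_natCast, List.filter_map, List.map_map]
  rw [pvFilterMapOfFilter]
  apply List.filterMap_congr
  intro k hk
  have hk' : k < start.length := List.mem_range.mp hk
  have hidx : (start.length : Int) - 1 - ((0 : Int) + (k : Int))
      = ((start.length - 1 - k : Nat) : Int) := by omega
  simp only [Function.comp, hidx, PySem.List.pyGetD_natCast]
  have hpow : (((0 : Int) + (k : Int)).toNat) = k := by omega
  rw [hpow]
  by_cases hc : start.getD (start.length - 1 - k) false = finish.getD (start.length - 1 - k) false <;>
    simp [hc]

-- ===== VERDICT (by name: the statement is the Claim_ definition above) =====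
theorem indirect_path_spec : Claim_equal_indirect_path := by
  intro start finish _ hpre
  unfold Spec_indirect_path indirect_path
  rw [pvRel, pvMain start.length true start finish rfl hpre, pvAlt start finish hpre]
  simp
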